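-- pv_equiv track=rewrite | github.com/Wang-Yu-Qing/MIND | utils.py | encode_books
-- ===== SOURCE A (Python) =====
-- def encode_books(valid_books):
--     encoder, decoder = {'<pad>': 0}, ['<pad>']
--     encode_id = 1
--     for book_id in valid_books:
--         if book_id not in encoder:
--             encoder[book_id] = encode_id
--             decoder.append(book_id)
--             encode_id += 1
--
--     return encoder, decoder
-- ===== SOURCE B (Python) =====
-- def encode_books(valid_books):
--     # Reverse overwrite pass: last write wins, so each non-pad id keeps its FIRST index.
--     first = {b: i for i, b in reversed(list(enumerate(valid_books))) if b != '<pad>'}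
--     # Sorting the distinct ids by first-occurrence index recovers encounter order.
--     decoder = ['<pad>'] + sorted(first, key=first.get)
--     encoder = {tok: i for i, tok in enumerate(decoder)}
--     return encoder, decoder
-- ===== Notes on version B (the rewrite author's own statement) =====
-- stated objective: alternative
-- what changed: B computes each id's first-occurrence index with a reversed overwrite dict comprehension and sorts the distinct ids by that index to recover encounter order, instead of A's single forward pass maintaining dict, list and counter in parallel.
import Mathlib
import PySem

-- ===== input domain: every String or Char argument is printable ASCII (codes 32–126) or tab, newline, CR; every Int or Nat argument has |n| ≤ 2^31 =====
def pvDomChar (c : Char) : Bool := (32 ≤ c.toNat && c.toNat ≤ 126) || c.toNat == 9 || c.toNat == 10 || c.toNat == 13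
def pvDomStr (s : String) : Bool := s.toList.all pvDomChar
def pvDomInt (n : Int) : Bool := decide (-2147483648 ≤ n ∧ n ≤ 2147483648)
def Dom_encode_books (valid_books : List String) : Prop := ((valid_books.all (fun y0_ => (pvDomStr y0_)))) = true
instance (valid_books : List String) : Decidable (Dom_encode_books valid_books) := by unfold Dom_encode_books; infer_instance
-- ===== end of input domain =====

-- B recovers the encounter order by sorting the distinct ids by their first-occurrence index
-- (computed by a reversed overwrite pass), instead of A's single forward dedup loop (alternative algorithm).

-- ===== PORT A =====
-- A: maintain dict, list and counter in parallel over one loop.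
def encode_books (valid_books : List String) : (List (String × Int)) × List String :=
  let s := valid_books.foldl
    (fun (s : PySem.Dict String Int × List String × Int) book_id =>
      if s.1.contains book_id then s
      else (s.1.insert book_id s.2.2, s.2.1 ++ [book_id], s.2.2 + 1))
    (PySem.Dict.ofList [("<pad>", 0)], ["<pad>"], 1)
  (s.1.items, s.2.1)

-- ===== PORT B =====
-- B: dict comprehension over the reversed enumeration (filtering out '<pad>'), then sort the keys
-- by their stored first index; 'key=first.get' is ported as getD (every sort key is present in first).
def encode_books_alt (valid_books : List String) : (List (String × Int)) × List String :=
  let first := (((PySem.List.enumerate valid_books 0).reverse.filter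
      (fun p => p.2 != "<pad>")).foldl
      (fun (d : PySem.Dict String Int) p => d.insert p.2 p.1) PySem.Dict.empty)
  let decoder := "<pad>" :: PySem.List.sorted first.keys (fun b => first.getD b 0) false
  let encoder := (PySem.List.enumerate decoder 0).foldl
    (fun (d : PySem.Dict String Int) p => d.insert p.2 p.1) PySem.Dict.empty
  (encoder.items, decoder)

-- ===== PRECONDITION & SPEC =====
def Spec_encode_books (valid_books : List String) (out : (List (String × Int)) × List String) : Prop := out = encode_books_alt valid_books
instance (valid_books : List String) (out : (List (String × Int)) × List String) : Decidable (Spec_encode_books valid_books out) := by unfold Spec_encode_books; infer_instance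

-- ===== CLAIM (what is proved, stated in full; the proofs are below) =====
def Claim_equal_encode_books : Prop := ∀ (valid_books : List String), Dom_encode_books valid_books → Spec_encode_books valid_books (encode_books valid_books)

-- ===== LEMMAS AND PROOFS =====

-- the invariant tying A's dict to the decoder built so far
def encInv (d : PySem.Dict String Int) (dec : List String) : Prop :=
  d.items = (PySem.List.enumerate dec 0).map (fun p => (p.2, p.1))

theorem keys_of_encInv (d : PySem.Dict String Int) (dec : List String)
    (h : encInv d dec) : d.keys = dec := by
  unfold encInv at h
  simp only [PySem.Dict.keys, h, List.map_map, Function.comp_def]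
  exact PySem.List.map_snd_enumerate dec 0

theorem contains_of_encInv (d : PySem.Dict String Int) (dec : List String)
    (h : encInv d dec) (b : String) : d.contains b = dec.contains b := by
  rcases hc : d.contains b with _ | _
  · symm
    simp only [List.contains_eq_mem, Bool.eq_false_iff, ne_eq, decide_eq_true_eq]
    intro hb
    rw [← keys_of_encInv d dec h] at hb
    rw [(PySem.Dict.contains_iff_mem_keys d b).mpr hb] at hc
    exact Bool.false_ne_true hc.symm
  · symm
    have := (PySem.Dict.contains_iff_mem_keys d b).mp hc
    rw [keys_of_encInv d dec h] at this
    simpa using this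

theorem loop_inv (vb : List String) (d : PySem.Dict String Int) (dec : List String)
    (h : encInv d dec) :
    vb.foldl
      (fun (s : PySem.Dict String Int × List String × Int) book_id =>
        if s.1.contains book_id then s
        else (s.1.insert book_id s.2.2, s.2.1 ++ [book_id], s.2.2 + 1))
      (d, dec, (dec.length : Int))
    = ((vb.foldl
        (fun (s : PySem.Dict String Int × List String × Int) book_id =>
          if s.1.contains book_id then s
          else (s.1.insert book_id s.2.2, s.2.1 ++ [book_id], s.2.2 + 1))
        (d, dec, (dec.length : Int))).1,
       vb.foldl PySem.Set.add dec, ((vb.foldl PySem.Set.add dec).length : Int))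
    ∧ encInv (vb.foldl
      (fun (s : PySem.Dict String Int × List String × Int) book_id =>
        if s.1.contains book_id then s
        else (s.1.insert book_id s.2.2, s.2.1 ++ [book_id], s.2.2 + 1))
      (d, dec, (dec.length : Int))).1 (vb.foldl PySem.Set.add dec) := by
  induction vb generalizing d dec with
  | nil => exact ⟨rfl, h⟩
  | cons b vb ih =>
    simp only [List.foldl_cons]
    rw [contains_of_encInv d dec h b]
    by_cases hb : dec.contains b = true
    · have hb' : b ∈ dec := by simpa [List.contains_eq_mem] using hb
      have ha : PySem.Set.add dec b = dec := by
        simp [PySem.Set.add, PySem.Set.contains, List.contains_eq_mem, hb']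
      rw [ha]
      simp only [hb, if_true]
      exact ih d dec h
    · have hb' : ¬ b ∈ dec := by simpa [List.contains_eq_mem] using hb
      have ha : PySem.Set.add dec b = dec ++ [b] := by
        simp [PySem.Set.add, PySem.Set.contains, List.contains_eq_mem, hb']
      rw [ha]
      simp only [if_neg hb]
      rw [Bool.not_eq_true] at hb
      have hinv : encInv (d.insert b (dec.length : Int)) (dec ++ [b]) := by
        unfold encInv
        rw [PySem.Dict.items_insert_of_not_contains d (dec.length : Int)
              (by rw [contains_of_encInv d dec h b]; exact hb),
            PySem.List.enumerate_append]
        unfold encInv at h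
        simp [h]
      have := ih (d.insert b (dec.length : Int)) (dec ++ [b]) hinv
      simpa [List.length_append] using this

theorem foldl_add_eq (vb : List String) (acc : List String) (hnd : acc.Nodup) :
    vb.foldl PySem.Set.add acc
      = acc ++ (PySem.List.dedup vb).filter (fun b => !acc.contains b) := by
  induction vb generalizing acc with
  | nil => simp [PySem.List.dedup, PySem.Set.ofList]
  | cons x vb ih =>
    have hded : PySem.List.dedup (x :: vb)
        = x :: (PySem.List.dedup vb).filter (fun b => !([x] : List String).contains b) := by
      show PySem.Set.ofList (x :: vb) = _
      rw [PySem.Set.ofList_eq_foldl]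
      simp only [List.foldl_cons]
      have : PySem.Set.add ([] : List String) x = [x] := by
        simp [PySem.Set.add, PySem.Set.contains]
      rw [this, ih [x] (List.nodup_singleton x)]
      rfl
    rw [hded, List.foldl_cons]
    by_cases hx : acc.contains x = true
    · have ha : PySem.Set.add acc x = acc := by
        simp [PySem.Set.add, PySem.Set.contains, List.contains_eq_mem, hx] <;> simpa [List.contains_eq_mem] using hx
      rw [ha, ih acc hnd]
      congr 1
      rw [List.filter_cons]
      simp only [hx, Bool.not_true, Bool.false_eq_true, if_neg, reduceIte]
      rw [List.filter_filter]
      apply List.filter_congr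
      intro b _
      by_cases hbx : b = x
      · subst hbx
        simp only [List.contains_eq_mem] at hx ⊢
        simp [hx]
      · simp [List.contains_eq_mem, hbx]
    · have ha : PySem.Set.add acc x = acc ++ [x] := by
        simp [PySem.Set.add, PySem.Set.contains, List.contains_eq_mem, hx] <;> simpa [List.contains_eq_mem] using hx
      have hx' : x ∉ acc := by simpa [List.contains_eq_mem] using hx
      have hnd' : (acc ++ [x]).Nodup := by
        simp only [List.nodup_append, List.nodup_singleton]
        refine ⟨hnd, trivial, fun a haa bb hbb => ?_⟩
        simp only [List.mem_singleton] at hbb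
        subst hbb
        intro h
        exact hx' (h ▸ haa)
      rw [ha, ih (acc ++ [x]) hnd']
      rw [List.filter_cons]
      simp only [hx, Bool.not_false, if_pos, reduceIte]
      rw [List.append_assoc]
      congr 1
      rw [List.singleton_append]
      congr 1
      rw [List.filter_filter]
      apply List.filter_congr
      intro b _
      simp [List.contains_append, Bool.not_or, Bool.and_comm]

theorem dedup_cons (x : String) (vb : List String) :
    PySem.List.dedup (x :: vb) = x :: (PySem.List.dedup vb).filter (fun b => b != x) := by
  show PySem.Set.ofList (x :: vb) = _
  rw [PySem.Set.ofList_eq_foldl]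
  simp only [List.foldl_cons]
  have h1 : PySem.Set.add ([] : List String) x = [x] := by
    simp [PySem.Set.add, PySem.Set.contains]
  rw [h1, foldl_add_eq vb [x] (List.nodup_singleton x), List.singleton_append]
  congr 1
  apply List.filter_congr
  intro b _
  by_cases hbx : b = x
  · subst hbx; simp
  · simp [List.contains_eq_mem, hbx, bne]

theorem dedup_pairwise_idxOf (vb : List String) :
    (PySem.List.dedup vb).Pairwise (fun a b => vb.idxOf a < vb.idxOf b) := by
  induction vb with
  | nil => simp [PySem.List.dedup, PySem.Set.ofList]
  | cons x vb ih =>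
    rw [dedup_cons]
    rw [List.pairwise_cons]
    constructor
    · intro b hb
      have hbx : b ≠ x := by
        have := (List.mem_filter.mp hb).2
        simpa [bne] using this
      rw [List.idxOf_cons_self, List.idxOf_cons_ne vb hbx.symm]
      exact Nat.succ_pos _
    · have h1 : ((PySem.List.dedup vb).filter (fun b => b != x)).Pairwise
          (fun a b => vb.idxOf a < vb.idxOf b) := List.Pairwise.filter _ ih
      refine h1.imp_of_mem ?_
      intro a b ha hb hab
      have hax : a ≠ x := by simpa [bne] using (List.mem_filter.mp ha).2
      have hbx : b ≠ x := by simpa [bne] using (List.mem_filter.mp hb).2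
      rw [List.idxOf_cons_ne vb hax.symm, List.idxOf_cons_ne vb hbx.symm]
      omega

theorem find_filter_enumerate (vb : List String) (s : Int) (b : String) (hb : b ≠ "<pad>") :
    (((PySem.List.enumerate vb s).filter (fun p => p.2 != "<pad>")).find?
        (fun q => q.2 == b))
      = if b ∈ vb then some ((s + (List.idxOf b vb : Int), b)) else none := by
  induction vb generalizing s with
  | nil => simp [PySem.List.enumerate]
  | cons x vb ih =>
    rw [PySem.List.enumerate_cons]
    by_cases hx : x = "<pad>"
    · subst hx
      rw [List.filter_cons]
      simp only [bne_self_eq_false, Bool.false_eq_true, reduceIte]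
      rw [ih (s + 1)]
      have hbm : (b ∈ "<pad>" :: vb) = (b ∈ vb) := by
        simp [hb]
      by_cases hmem : b ∈ vb
      · simp only [hmem, if_pos, List.mem_cons, hb, false_or]
        rw [List.idxOf_cons_ne vb (Ne.symm hb)]
        congr 2
        push_cast
        ring
      · simp [hmem, hb]
    · rw [List.filter_cons]
      simp only [show ((s, x).2 != "<pad>") = true by simpa [bne] using hx, if_pos, reduceIte]
      rw [List.find?_cons]
      by_cases hxb : x = b
      · subst hxb
        simp [List.idxOf_cons_self]
      · have : ((s, x).2 == b) = false := by simpa using hxb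
        rw [this]
        rw [ih (s + 1)]
        by_cases hmem : b ∈ vb
        · simp only [hmem, if_pos, List.mem_cons, or_true, reduceIte]
          rw [List.idxOf_cons_ne vb hxb]
          congr 2
          push_cast
          ring
        · have : ¬ b ∈ x :: vb := by
            simp only [List.mem_cons, not_or]
            exact ⟨fun h => hxb h.symm, hmem⟩
          simp [hmem, this]

theorem foldr_insert_get? (ps : List (Int × String)) (d : PySem.Dict String Int) (b : String) :
    (ps.foldr (fun p d => d.insert p.2 p.1) d).get? b
      = ((ps.find? (fun p => p.2 == b)).map (fun p => p.1)).or (d.get? b) := by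
  induction ps with
  | nil => simp
  | cons p ps ih =>
    rw [List.foldr_cons, List.find?_cons]
    by_cases hpb : p.2 = b
    · subst hpb
      rw [PySem.Dict.get?_insert_self]
      simp
    · have h1 : (p.2 == b) = false := by simpa using hpb
      rw [h1, PySem.Dict.get?_insert_of_ne _ _ (fun h => hpb h.symm)]
      exact ih


theorem get?_first (vb : List String) (b : String) :
    ((((PySem.List.enumerate vb 0).reverse.filter (fun p => p.2 != "<pad>")).foldl
      (fun (d : PySem.Dict String Int) p => d.insert p.2 p.1) PySem.Dict.empty).get? b)
    = if b ∈ vb ∧ b ≠ "<pad>" then some ((List.idxOf b vb : Int)) else none := by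
  rw [List.filter_reverse, List.foldl_reverse]
  rw [foldr_insert_get?]
  by_cases hb : b = "<pad>"
  · subst hb
    have hfind : (((PySem.List.enumerate vb 0).filter (fun p => p.2 != "<pad>")).find?
        (fun q => q.2 == "<pad>")) = none := by
      rw [List.find?_eq_none]
      intro p hp
      have := (List.mem_filter.mp hp).2
      simpa [bne] using this
    simp [hfind]
  · rw [find_filter_enumerate vb 0 b hb]
    by_cases hmem : b ∈ vb
    · simp [hmem, hb]
    · simp [hmem, hb]


theorem decoder_eq (vb : List String) :
    ("<pad>" :: PySem.List.sorted
        ((((PySem.List.enumerate vb 0).reverse.filter (fun p => p.2 != "<pad>")).foldl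
          (fun (d : PySem.Dict String Int) p => d.insert p.2 p.1) PySem.Dict.empty).keys)
        (fun b => (((PySem.List.enumerate vb 0).reverse.filter (fun p => p.2 != "<pad>")).foldl
          (fun (d : PySem.Dict String Int) p => d.insert p.2 p.1) PySem.Dict.empty).getD b 0) false)
      = vb.foldl PySem.Set.add ["<pad>"] := by
  have hdec : vb.foldl PySem.Set.add ["<pad>"]
      = "<pad>" :: (PySem.List.dedup vb).filter (fun b => b != "<pad>") := by
    rw [foldl_add_eq vb ["<pad>"] (List.nodup_singleton _), List.singleton_append]
    congr 1
    apply List.filter_congr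
    intro b _
    by_cases hb : b = "<pad>"
    · subst hb; simp
    · simp [List.contains_eq_mem, hb, bne]
  rw [hdec]
  congr 1
  have hndk : ((((PySem.List.enumerate vb 0).reverse.filter (fun p => p.2 != "<pad>")).foldl
      (fun (d : PySem.Dict String Int) p => d.insert p.2 p.1) PySem.Dict.empty).keys).Nodup := by
    exact PySem.Dict.nodup_keys_foldl_insert_key _ (fun (p : Int × String) => p.2)
      (fun (_ : PySem.Dict String Int) (p : Int × String) => p.1) _
      PySem.Dict.nodup_keys_empty
  have hmemk : ∀ b, b ∈ (((PySem.List.enumerate vb 0).reverse.filter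
        (fun p => p.2 != "<pad>")).foldl
        (fun (d : PySem.Dict String Int) p => d.insert p.2 p.1) PySem.Dict.empty).keys
      ↔ (b ∈ vb ∧ b ≠ "<pad>") := by
    intro b
    rw [← not_iff_not, ← PySem.Dict.get?_eq_none_iff_not_mem_keys, get?_first]
    by_cases h : b ∈ vb ∧ b ≠ "<pad>" <;> simp [h]
  have hndys : ((PySem.List.dedup vb).filter (fun b => b != "<pad>")).Nodup :=
    (PySem.List.nodup_dedup vb).filter _
  have hmemys : ∀ b, b ∈ (PySem.List.dedup vb).filter (fun b => b != "<pad>")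
      ↔ (b ∈ vb ∧ b ≠ "<pad>") := by
    intro b
    rw [List.mem_filter, PySem.List.mem_dedup]
    simp [bne]
  have hperm : ((PySem.List.dedup vb).filter (fun b => b != "<pad>")).Perm
      ((((PySem.List.enumerate vb 0).reverse.filter (fun p => p.2 != "<pad>")).foldl
        (fun (d : PySem.Dict String Int) p => d.insert p.2 p.1) PySem.Dict.empty).keys) :=
    (List.perm_ext_iff_of_nodup hndys hndk).mpr (fun a => (hmemys a).trans (hmemk a).symm)
  have hpair : ((PySem.List.dedup vb).filter (fun b => b != "<pad>")).Pairwise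
      (fun a b => (((PySem.List.enumerate vb 0).reverse.filter (fun p => p.2 != "<pad>")).foldl
          (fun (d : PySem.Dict String Int) p => d.insert p.2 p.1) PySem.Dict.empty).getD a 0
        < (((PySem.List.enumerate vb 0).reverse.filter (fun p => p.2 != "<pad>")).foldl
          (fun (d : PySem.Dict String Int) p => d.insert p.2 p.1) PySem.Dict.empty).getD b 0) := by
    refine ((dedup_pairwise_idxOf vb).filter _).imp_of_mem ?_
    intro a b ha hb hab
    obtain ⟨hav, hap⟩ := (hmemys a).mp ha
    obtain ⟨hbv, hbp⟩ := (hmemys b).mp hb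
    rw [PySem.Dict.getD_eq_get?_getD, PySem.Dict.getD_eq_get?_getD,
        get?_first, get?_first, if_pos ⟨hav, hap⟩, if_pos ⟨hbv, hbp⟩]
    simp only [Option.getD_some]
    exact_mod_cast hab
  exact PySem.List.sorted_eq_of_perm_of_pairwise_lt _ _ _ hperm hpair

theorem encode_books_spec : Claim_equal_encode_books := by
  intro vb _
  simp only [Spec_encode_books, encode_books, encode_books_alt]
  have h0 : encInv (PySem.Dict.ofList [("<pad>", 0)]) ["<pad>"] := by
    unfold encInv; decide
  obtain ⟨h1, h2⟩ := loop_inv vb (PySem.Dict.ofList [("<pad>", 0)]) ["<pad>"] h0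
  have hlen : (((["<pad>"] : List String).length : Nat) : Int) = 1 := by norm_num
  rw [hlen] at h1 h2
  have e2 := congrArg (fun (s : PySem.Dict String Int × List String × Int) => s.2.1) h1
  simp only at e2
  unfold encInv at h2
  rw [decoder_eq vb]
  have hnd : (vb.foldl PySem.Set.add ["<pad>"]).Nodup :=
    PySem.Set.nodup_update ["<pad>"] vb (by decide)
  have hitems : ((PySem.List.enumerate (vb.foldl PySem.Set.add ["<pad>"]) 0).foldl
      (fun (d : PySem.Dict String Int) p => d.insert p.2 p.1) PySem.Dict.empty).items
      = (PySem.List.enumerate (vb.foldl PySem.Set.add ["<pad>"]) 0).map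
          (fun p => (p.2, p.1)) := by
    rw [PySem.Dict.items_foldl_insert_fresh (PySem.List.enumerate (vb.foldl PySem.Set.add ["<pad>"]) 0)
          (fun p => p.2) (fun p => p.1) (PySem.Dict.empty : PySem.Dict String Int)
          (fun a _ => PySem.Dict.contains_empty a.2)
          (by rw [PySem.List.map_snd_enumerate]; exact hnd)]
    rfl
  rw [hitems, e2, h2]
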